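-- pv_equiv track=rewrite | github.com/FirmwareDroid/FirmwareDroid | scripts/statistics/reports/androguard/androguard_statistics.py | get_grouped_permissions_by_level
-- ===== SOURCE A (Python) =====
-- def get_grouped_permissions_by_level(permission_by_level_count_dict):
--     grouped_permissions_dict = {}
--     for protection_level, total_permission_count in permission_by_level_count_dict.items():
--         main_protection_level = protection_level.split("|")[0]
--         if main_protection_level not in grouped_permissions_dict:
--             grouped_permissions_dict[main_protection_level] = total_permission_count
--         else:
--             grouped_permissions_dict[main_protection_level] += total_permission_count
--     return grouped_permissions_dict
-- ===== SOURCE B (Python) =====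
-- def get_grouped_permissions_by_level(permission_by_level_count_dict):
--     # collect-then-reduce: first gather every count into a per-main-level
--     # bucket list, then sum each bucket
--     buckets = {}
--     for k, v in permission_by_level_count_dict.items():
--         buckets.setdefault(k.split("|")[0], []).append(v)
--     return {m: sum(vs) for m, vs in buckets.items()}
-- ===== Notes on version B (the rewrite author's own statement) =====
-- stated objective: alternative
-- what changed: A keeps running integer totals, branching on whether the main level is already a key and adding in place; B instead collects every count into a per-main-level bucket list in one pass and then reduces each bucket with sum in a second pass.
import Mathlib
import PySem

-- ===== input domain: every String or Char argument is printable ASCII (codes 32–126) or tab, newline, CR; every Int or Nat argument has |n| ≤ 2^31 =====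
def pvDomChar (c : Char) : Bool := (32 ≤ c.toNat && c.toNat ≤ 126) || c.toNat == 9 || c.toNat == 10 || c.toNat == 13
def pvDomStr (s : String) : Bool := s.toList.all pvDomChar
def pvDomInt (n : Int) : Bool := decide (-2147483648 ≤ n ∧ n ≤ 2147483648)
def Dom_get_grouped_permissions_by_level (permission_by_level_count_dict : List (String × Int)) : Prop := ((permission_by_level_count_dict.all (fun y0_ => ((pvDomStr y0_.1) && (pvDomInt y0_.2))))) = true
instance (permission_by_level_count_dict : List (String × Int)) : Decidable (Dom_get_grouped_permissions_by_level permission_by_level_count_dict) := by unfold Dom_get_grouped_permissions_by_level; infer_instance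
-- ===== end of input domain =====

-- B replaces A's running-sum accumulation (membership branch + in-place +=) by a
-- collect-then-reduce pass: bucket every count per main level, then sum each bucket.

-- protection_level.split("|")[0] : split with the nonempty separator "|" always returns a
-- nonempty list (split? = some of it), so Python's [0] never raises and equals headD "" exactly.
def mainLevel (k : String) : String := ((PySem.Str.split? k "|").getD []).headD ""

-- ===== PORT A =====
def get_grouped_permissions_by_level (permission_by_level_count_dict : List (String × Int)) : List (String × Int) :=
  (permission_by_level_count_dict.foldl
    (fun (g : PySem.Dict String Int) kv =>
      let m := mainLevel kv.1
      if g.contains m = false then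
        g.insert m kv.2
      else
        g.insert m (g.getD m 0 + kv.2))
    PySem.Dict.empty).items

-- ===== PORT B =====
def get_grouped_permissions_by_level_alt (permission_by_level_count_dict : List (String × Int)) : List (String × Int) :=
  let buckets := permission_by_level_count_dict.foldl
    (fun (b : PySem.Dict String (List Int)) kv =>
      b.modify (mainLevel kv.1) [] (fun vs => vs ++ [kv.2]))
    PySem.Dict.empty
  buckets.items.map (fun p => (p.1, p.2.sum))

-- ===== PRECONDITION & SPEC =====
def Spec_get_grouped_permissions_by_level (permission_by_level_count_dict : List (String × Int)) (out : List (String × Int)) : Prop := out = get_grouped_permissions_by_level_alt permission_by_level_count_dict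
instance (permission_by_level_count_dict : List (String × Int)) (out : List (String × Int)) : Decidable (Spec_get_grouped_permissions_by_level permission_by_level_count_dict out) := by unfold Spec_get_grouped_permissions_by_level; infer_instance

-- ===== CLAIM (what is proved, stated in full; the proofs are below) =====
def Claim_equal_get_grouped_permissions_by_level : Prop := ∀ (permission_by_level_count_dict : List (String × Int)), Dom_get_grouped_permissions_by_level permission_by_level_count_dict → Spec_get_grouped_permissions_by_level permission_by_level_count_dict (get_grouped_permissions_by_level permission_by_level_count_dict)

-- ===== LEMMAS AND PROOFS =====

-- A's loop body, uniformly: both branches insert (old value, default 0) + count.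
theorem stepA_eq (g : PySem.Dict String Int) (kv : String × Int) :
    (let m := mainLevel kv.1
     if g.contains m = false then g.insert m kv.2
     else g.insert m (g.getD m 0 + kv.2))
    = g.insert (mainLevel kv.1) (g.getD (mainLevel kv.1) 0 + kv.2) := by
  by_cases h : g.contains (mainLevel kv.1) = false
  · simp [h, PySem.Dict.getD_of_not_contains g 0 h]
  · simp [h]

-- value invariant of the uniform loop
theorem getD_fold (l : List (String × Int)) (g : PySem.Dict String Int) (m : String) :
    (l.foldl (fun g kv => g.insert (mainLevel kv.1) (g.getD (mainLevel kv.1) 0 + kv.2)) g).getD m 0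
    = g.getD m 0 + ((l.filter (fun kv => mainLevel kv.1 == m)).map (fun kv => kv.2)).sum := by
  induction l generalizing g with
  | nil => simp
  | cons kv t ih =>
      simp only [List.foldl_cons, ih, List.filter_cons]
      by_cases h : mainLevel kv.1 = m
      · simp [h]; ring
      · have h' : (mainLevel kv.1 == m) = false := by simp [h]
        simp [h', PySem.Dict.getD_insert, Ne.symm h]

-- bucket invariant of B's collect loop
theorem getD_bucket (l : List (String × Int)) (g : PySem.Dict String (List Int)) (m : String) :
    (l.foldl (fun b kv => b.modify (mainLevel kv.1) [] (fun vs => vs ++ [kv.2])) g).getD m []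
    = g.getD m [] ++ (l.filter (fun kv => mainLevel kv.1 == m)).map (fun kv => kv.2) := by
  induction l generalizing g with
  | nil => simp
  | cons kv t ih =>
      simp only [List.foldl_cons, ih, List.filter_cons]
      by_cases h : mainLevel kv.1 = m
      · simp [h, List.append_assoc]
      · have h' : (mainLevel kv.1 == m) = false := by simp [h]
        simp [h', PySem.Dict.getD_modify, Ne.symm h]

theorem main_eq (d : List (String × Int)) :
    get_grouped_permissions_by_level d = get_grouped_permissions_by_level_alt d := by
  have hz : get_grouped_permissions_by_level_alt d
      = ((d.foldl (fun (b : PySem.Dict String (List Int)) kv =>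
          b.modify (mainLevel kv.1) [] (fun vs => vs ++ [kv.2]))
          PySem.Dict.empty).items).map (fun p => (p.1, p.2.sum)) := rfl
  rw [hz]
  unfold get_grouped_permissions_by_level
  have hstep : (fun (g : PySem.Dict String Int) (kv : String × Int) =>
      let m := mainLevel kv.1
      if g.contains m = false then g.insert m kv.2
      else g.insert m (g.getD m 0 + kv.2))
      = fun g kv => g.insert (mainLevel kv.1) (g.getD (mainLevel kv.1) 0 + kv.2) := by
    funext g kv; exact stepA_eq g kv
  rw [hstep]
  have hndA : (d.foldl (fun (g : PySem.Dict String Int) kv =>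
      g.insert (mainLevel kv.1) (g.getD (mainLevel kv.1) 0 + kv.2)) PySem.Dict.empty).keys.Nodup :=
    PySem.Dict.nodup_keys_foldl_insert_key d (fun kv => mainLevel kv.1) _ _
      PySem.Dict.nodup_keys_empty
  have hndB : (d.foldl (fun (b : PySem.Dict String (List Int)) kv =>
      b.modify (mainLevel kv.1) [] (fun vs => vs ++ [kv.2])) PySem.Dict.empty).keys.Nodup :=
    PySem.Dict.nodup_keys_foldl_modify_key d (fun kv => mainLevel kv.1) []
      (fun _ kv vs => vs ++ [kv.2]) _ PySem.Dict.nodup_keys_empty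
  rw [PySem.Dict.items_eq_map_keys _ hndA 0,
      PySem.Dict.items_eq_map_keys _ hndB [],
      PySem.Dict.keys_foldl_insert_key d (fun kv => mainLevel kv.1)
        (fun g kv => g.getD (mainLevel kv.1) 0 + kv.2) PySem.Dict.empty,
      PySem.Dict.keys_foldl_modify_key d (fun kv => mainLevel kv.1) []
        (fun _ kv vs => vs ++ [kv.2]) PySem.Dict.empty,
      List.map_map]
  refine List.map_congr_left (fun m _ => ?_)
  simp only [Function.comp]
  rw [getD_fold, getD_bucket]
  simp

-- ===== VERDICT (by name: the statement is the Claim_ definition above) =====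

theorem get_grouped_permissions_by_level_spec : Claim_equal_get_grouped_permissions_by_level := by
  intro d _
  exact main_eq d
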